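-- pv_equiv track=rewrite | github.com/mattdp/aoc-22 | 2022/8-code.py | height_check
-- ===== SOURCE A (Python) =====
-- def height_check(treelines,i):
--
--     treeline = treelines[i]
--
--     highest_tree = -1
--     indexes = list(range(0,len(treeline)))
--     for i in indexes:
--         tree = treeline[i]
--         if tree[0] > highest_tree:
--             highest_tree = tree[0]
--             tree[1] = 1
--         elif tree[1] == 1:
--             pass
--         else:
--             tree[1] = 0
--
--     #sweep from opposite direction
--     highest_tree = -1
--     indexes.reverse()
--     for i in indexes:
--         tree = treeline[i]
--         if tree[0] > highest_tree:
--             highest_tree = tree[0]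
--             tree[1] = 1
--         elif tree[1] == 1:
--             pass
--         else:
--             tree[1] = 0
--
--     return treeline
-- ===== SOURCE B (Python) =====
-- def height_check(treelines, i):
--     treeline = treelines[i]
--     left_vis = []
--     m = -1
--     for tree in treeline:
--         left_vis.append(tree[0] > m)
--         if tree[0] > m:
--             m = tree[0]
--     right_vis = []
--     m = -1
--     for tree in reversed(treeline):
--         right_vis.append(tree[0] > m)
--         if tree[0] > m:
--             m = tree[0]
--     right_vis.reverse()
--     for j, tree in enumerate(treeline):
--         tree[1] = 1 if left_vis[j] or right_vis[j] or tree[1] == 1 else 0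
--     return treeline
-- ===== Notes on version B (the rewrite author's own statement) =====
-- stated objective: alternative
-- what changed: B replaces A's two in-place flag-mutating sweeps (where the backward sweep reads flags the forward sweep wrote) by two stateless boolean left/right visibility tables built with a running max, combined with the original flag in one separate final pass.
import Mathlib
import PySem

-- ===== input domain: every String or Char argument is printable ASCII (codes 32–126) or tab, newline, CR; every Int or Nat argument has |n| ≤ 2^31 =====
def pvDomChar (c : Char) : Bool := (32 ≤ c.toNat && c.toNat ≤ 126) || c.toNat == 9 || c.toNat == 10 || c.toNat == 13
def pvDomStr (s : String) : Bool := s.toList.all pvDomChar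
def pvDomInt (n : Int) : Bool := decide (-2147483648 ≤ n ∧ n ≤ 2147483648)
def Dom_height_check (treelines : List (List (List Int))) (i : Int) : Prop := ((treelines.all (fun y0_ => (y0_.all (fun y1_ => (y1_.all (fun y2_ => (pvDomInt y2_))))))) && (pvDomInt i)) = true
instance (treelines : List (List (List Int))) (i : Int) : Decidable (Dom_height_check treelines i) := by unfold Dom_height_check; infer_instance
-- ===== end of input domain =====

-- B builds boolean left/right visibility tables in two stateless scans and combines them with the
-- original flag in one final pass, instead of A's two flag-mutating sweeps; same O(n), objective: alternative.
-- Both Pythons mutate the sublists of treelines[i] in place; the equivalence proved is about the return value.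

-- ===== PORT A =====
-- one sweep of A's mutating loop: running max `highest_tree`, tree[1] updated in place
def hcSweep (h : Int) (line : List (List Int)) : List (List Int) :=
  match line with
  | [] => []
  | tree :: rest =>
    if PySem.List.pyGetD tree 0 0 > h then
      PySem.List.pySetD tree 1 1 :: hcSweep (PySem.List.pyGetD tree 0 0) rest
    else if PySem.List.pyGetD tree 1 0 = 1 then tree :: hcSweep h rest
    else PySem.List.pySetD tree 1 0 :: hcSweep h rest

def height_check (treelines : List (List (List Int))) (i : Int) : List (List Int) :=
  let treeline := (PySem.List.pyGet? treelines i).getD []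
  let after1 := hcSweep (-1) treeline
  -- second sweep walks the reversed index list over the mutated line
  (hcSweep (-1) after1.reverse).reverse

-- ===== PORT B =====
-- stateless visibility table: vis[j] = (tree[0] > running max)
def visSweep (m : Int) (line : List (List Int)) : List Bool :=
  match line with
  | [] => []
  | tree :: rest =>
    decide (PySem.List.pyGetD tree 0 0 > m) ::
      visSweep (if PySem.List.pyGetD tree 0 0 > m then PySem.List.pyGetD tree 0 0 else m) rest

-- final pass: tree[1] = 1 if left_vis[j] or right_vis[j] or tree[1] == 1 else 0
def combineVis (lv rv : List Bool) (line : List (List Int)) : List (List Int) :=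
  match lv, rv, line with
  | v :: vs, w :: ws, tree :: rest =>
    PySem.List.pySetD tree 1 (if v || w || PySem.List.pyGetD tree 1 0 = 1 then 1 else 0)
      :: combineVis vs ws rest
  | _, _, _ => []

def height_check_alt (treelines : List (List (List Int))) (i : Int) : List (List Int) :=
  let treeline := (PySem.List.pyGet? treelines i).getD []
  let lv := visSweep (-1) treeline
  let rv := (visSweep (-1) treeline.reverse).reverse
  combineVis lv rv treeline

-- ===== PRECONDITION & SPEC =====
-- Pre_ excludes exactly the inputs where the Python raises: an out-of-range index i (IndexError on
-- treelines[i]) and lines containing a tree list of length < 2 (IndexError on tree[0] / tree[1]).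
def Pre_height_check (treelines : List (List (List Int))) (i : Int) : Prop :=
  PySem.Raise.InRange treelines.length i ∧
    ∀ t ∈ (PySem.List.pyGet? treelines i).getD [], 2 ≤ t.length
instance (treelines : List (List (List Int))) (i : Int) : Decidable (Pre_height_check treelines i) := by unfold Pre_height_check; infer_instance

def pvWitness_height_check : List (List (List Int)) × Int := ([[[3, 0], [1, 0], [4, 1]]], 0)

def Spec_height_check (treelines : List (List (List Int))) (i : Int) (out : List (List Int)) : Prop := out = height_check_alt treelines i
instance (treelines : List (List (List Int))) (i : Int) (out : List (List Int)) : Decidable (Spec_height_check treelines i out) := by unfold Spec_height_check; infer_instance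

-- ===== CLAIM (what is proved, stated in full; the proofs are below) =====
def Claim_equal_height_check : Prop := ∀ (treelines : List (List (List Int))) (i : Int), Dom_height_check treelines i → Pre_height_check treelines i → Spec_height_check treelines i (height_check treelines i)

-- ===== LEMMAS AND PROOFS =====

-- writing flag v into a tree, reading the old flag: the common shape of both ports' element update
def mark (v : Bool) (t : List Int) : List Int :=
  PySem.List.pySetD t 1 (if v || PySem.List.pyGetD t 1 0 = 1 then 1 else 0)

theorem pySetD_one_cases (t : List Int) (v : Int) :
    PySem.List.pySetD t 1 v =
      match t with
      | a :: _ :: r => a :: v :: r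
      | t => t := by
  rcases t with _ | ⟨a, _ | ⟨b, r⟩⟩ <;>
    simp [PySem.List.pySetD, PySem.List.pySet?, PySem.List.pyIdx?]

theorem pyGetD_one_cases (t : List Int) (d : Int) :
    PySem.List.pyGetD t 1 d =
      match t with
      | _ :: b :: _ => b
      | _ => d := by
  rcases t with _ | ⟨a, _ | ⟨b, r⟩⟩ <;>
    simp [PySem.List.pyGetD, PySem.List.pyGet?, PySem.List.pyIdx?]

theorem pyGetD_zero_mark (v : Bool) (t : List Int) (d : Int) :
    PySem.List.pyGetD (mark v t) 0 d = PySem.List.pyGetD t 0 d := by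
  rcases t with _ | ⟨a, _ | ⟨b, r⟩⟩ <;>
    simp [mark, pySetD_one_cases, PySem.List.pyGetD_zero]

theorem mark_mark (v w : Bool) (t : List Int) :
    mark w (mark v t) = mark (v || w) t := by
  rcases t with _ | ⟨a, _ | ⟨b, r⟩⟩ <;>
    simp only [mark, pySetD_one_cases, pyGetD_one_cases] <;> cases v <;> cases w <;>
    by_cases hb : b = 1 <;> simp [hb]

theorem sweep_eq_app (h : Int) (line : List (List Int)) :
    hcSweep h line = List.zipWith mark (visSweep h line) line := by
  induction line generalizing h with
  | nil => rfl
  | cons t rest ih =>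
    by_cases hgt : PySem.List.pyGetD t 0 0 > h
    · simp only [hcSweep, visSweep, if_pos hgt, decide_eq_true hgt, List.zipWith_cons_cons, ih]
      congr 1
    · by_cases hfl : PySem.List.pyGetD t 1 0 = 1
      · simp only [hcSweep, visSweep, if_neg hgt, if_pos hfl, decide_eq_false hgt,
          List.zipWith_cons_cons, ih]
        congr 1
        rcases t with _ | ⟨a, _ | ⟨b, r⟩⟩ <;>
          simp_all [mark, pySetD_one_cases, pyGetD_one_cases]
      · simp only [hcSweep, visSweep, if_neg hgt, if_neg hfl, decide_eq_false hgt,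
          List.zipWith_cons_cons, ih]
        congr 1
        simp [mark, hfl]

theorem length_visSweep (m : Int) (line : List (List Int)) :
    (visSweep m line).length = line.length := by
  induction line generalizing m with
  | nil => rfl
  | cons t rest ih => simp [visSweep, ih]

theorem visSweep_app (m : Int) (vs : List Bool) (line : List (List Int)) :
    visSweep m (List.zipWith mark vs line) = visSweep m (line.take vs.length) := by
  induction line generalizing m vs with
  | nil => simp
  | cons t rest ih =>
    cases vs with
    | nil => simp [visSweep]
    | cons v vs =>
      simp only [List.zipWith_cons_cons, visSweep, List.length_cons, List.take_succ_cons,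
        pyGetD_zero_mark, ih]

theorem app_app (vs ws : List Bool) (line : List (List Int)) (hlen : vs.length = ws.length) :
    List.zipWith mark ws (List.zipWith mark vs line) =
      List.zipWith mark (List.zipWith (· || ·) vs ws) line := by
  induction line generalizing vs ws with
  | nil => simp
  | cons t rest ih =>
    cases vs with
    | nil => cases ws <;> simp_all
    | cons v vs =>
      cases ws with
      | nil => simp at hlen
      | cons w ws =>
        simp only [List.zipWith_cons_cons, mark_mark]
        rw [ih vs ws (by simpa using hlen)]

theorem combine_eq (lv rv : List Bool) (line : List (List Int)) :
    combineVis lv rv line = List.zipWith mark (List.zipWith (· || ·) lv rv) line := by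
  induction line generalizing lv rv with
  | nil => cases lv <;> cases rv <;> rfl
  | cons t rest ih =>
    cases lv with
    | nil => rfl
    | cons v vs =>
      cases rv with
      | nil => rfl
      | cons w ws =>
        simp only [combineVis, List.zipWith_cons_cons, ih, mark, Bool.or_assoc]

theorem core_eq (line : List (List Int)) :
    (hcSweep (-1) (hcSweep (-1) line).reverse).reverse =
      combineVis (visSweep (-1) line) ((visSweep (-1) line.reverse).reverse) line := by
  have hlvlen : (visSweep (-1) line).length = line.length := length_visSweep _ _
  have hrv0len : (visSweep (-1) line.reverse).length = line.length := by
    simp [length_visSweep]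
  rw [sweep_eq_app (-1) line]
  rw [sweep_eq_app (-1) (List.zipWith mark (visSweep (-1) line) line).reverse]
  have hrev : (List.zipWith mark (visSweep (-1) line) line).reverse =
      List.zipWith mark (visSweep (-1) line).reverse line.reverse :=
    List.reverse_zipWith (by simpa using hlvlen)
  have hvis2 : visSweep (-1) (List.zipWith mark (visSweep (-1) line) line).reverse =
      visSweep (-1) line.reverse := by
    rw [hrev, visSweep_app, List.length_reverse, hlvlen, ← List.length_reverse (as := line),
      List.take_length]
  rw [hvis2]
  rw [List.reverse_zipWith (by
    simp [hrv0len, hlvlen]), List.reverse_reverse]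
  rw [app_app _ _ _ (by simp [hlvlen, hrv0len])]
  rw [combine_eq]

-- ===== VERDICT (by name: the statement is the Claim_ definition above) =====
theorem height_check_spec : Claim_equal_height_check := by
  intro treelines i _ _
  unfold Spec_height_check height_check height_check_alt
  exact core_eq _
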